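-- pv_equiv track=rewrite | github.com/Gutierrez-Escobar-AJ/SpacekmerSDI | SpacekmerSDI_v3.py | spaced_kmer
-- ===== SOURCE A (Python) =====
-- from typing import List, Tuple
--
-- def spaced_kmer(sequence: str, mask: str) -> List[str]:
--     """
--     Extract spaced k-mers from a sequence using a binary mask.
--     Skips k-mers containing non-standard nucleotides (non-ATGC) in masked positions.
--     """
--     k = len(mask)
--     valid_nucleotides = {'A', 'T', 'C', 'G'}
--     valid_kmers = []
--
--     for i in range(len(sequence) - k + 1):
--         valid = True
--         # Check all masked positions for valid nucleotides
--         for j, m in enumerate(mask):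
--             if m == '1':
--                 try:
--                     if sequence[i+j].upper() not in valid_nucleotides:
--                         valid = False
--                         break
--                 except IndexError:
--                     valid = False
--                     break
--         if valid:
--             kmer = ''.join([sequence[i + j] for j, m in enumerate(mask) if m == '1'])
--             valid_kmers.append(kmer)
--
--     return valid_kmers
-- ===== SOURCE B (Python) =====
-- def spaced_kmer(sequence: str, mask: str):
--     """
--     Extract spaced k-mers from a sequence using a binary mask.
--     Bad-character sieve: find the positions of non-ACGT characters once,
--     subtract each masked offset to get the window starts they poison,
--     and emit kmers only for the unpoisoned starts.
--     """
--     ones = [j for j, m in enumerate(mask) if m == '1']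
--     bad_starts = {b - j
--                   for b, c in enumerate(sequence)
--                   if c.upper() not in {'A', 'T', 'C', 'G'}
--                   for j in ones}
--     return [''.join(sequence[i + j] for j in ones)
--             for i in range(len(sequence) - len(mask) + 1)
--             if i not in bad_starts]
-- ===== Notes on version B (the rewrite author's own statement) =====
-- stated objective: alternative
-- what changed: B inverts the validation: instead of A's per-window scan of the mask's positions, it locates the non-ACGT characters once and sieves out every window start each such character poisons (its position minus each masked offset, collected in a set), then emits kmers for the surviving starts.
import Mathlib
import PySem

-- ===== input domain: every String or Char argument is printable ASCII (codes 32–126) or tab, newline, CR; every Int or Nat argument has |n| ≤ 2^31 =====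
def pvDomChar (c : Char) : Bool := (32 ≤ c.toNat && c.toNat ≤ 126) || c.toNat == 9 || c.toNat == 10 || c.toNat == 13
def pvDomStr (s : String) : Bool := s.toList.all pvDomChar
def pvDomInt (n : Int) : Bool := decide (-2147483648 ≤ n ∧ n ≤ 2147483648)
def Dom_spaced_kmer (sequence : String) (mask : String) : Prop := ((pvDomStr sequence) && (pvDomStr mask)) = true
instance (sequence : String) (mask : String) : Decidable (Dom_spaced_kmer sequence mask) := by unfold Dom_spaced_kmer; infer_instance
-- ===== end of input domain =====

-- B replaces A's per-window validation by a bad-character sieve: it collects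
-- the positions of non-ACGT characters once, turns each into the set of window
-- starts it poisons (position minus each masked offset), and emits kmers only
-- for unpoisoned starts; same return value (objective: alternative).

-- ===== PORT A =====
-- A's inner check loop: for j, m in enumerate(mask), with early break and the
-- IndexError branch (pyGet? = none) mapped to valid = False.
def pvCheckA (s : List Char) (i : Int) : List (Int × Char) → Bool
  | [] => true
  | (j, m) :: rest =>
    if m = '1' then
      match PySem.List.pyGet? s (i + j) with
      | none => false
      | some c =>
        if !(['A', 'T', 'C', 'G'].contains c.toUpper) then false
        else pvCheckA s i rest
    else pvCheckA s i rest

-- A's kmer comprehension: [sequence[i+j] for j, m in enumerate(mask) if m == '1']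
-- (only evaluated when the check passed, so every pyGet? is in range there).
def pvBuildA (s : List Char) (i : Int) (em : List (Int × Char)) : List Char :=
  em.filterMap (fun p => if p.2 = '1' then PySem.List.pyGet? s (i + p.1) else none)

def spaced_kmer (sequence : String) (mask : String) : List String :=
  let s := sequence.toList
  let em := PySem.List.enumerate mask.toList
  (PySem.List.pyRange 0 ((s.length : Int) - (mask.toList.length : Int) + 1) 1).foldl
    (fun acc i =>
      if pvCheckA s i em then acc ++ [String.mk (pvBuildA s i em)] else acc) []

-- ===== PORT B =====
-- c.upper() in {'A','T','C','G'}
def pvValid (c : Char) : Bool := ['A', 'T', 'C', 'G'].contains c.toUpper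

-- ones = [j for j, m in enumerate(mask) if m == '1']
def pvOnesB (mask : List Char) : List Int :=
  (PySem.List.enumerate mask).filterMap (fun p => if p.2 = '1' then some p.1 else none)

-- bad_starts = {b - j for b, c in enumerate(sequence) if c invalid for j in ones}
def pvBadStarts (s : List Char) (ones : List Int) : PySem.Set Int :=
  PySem.Set.ofList ((PySem.List.enumerate s).flatMap
    (fun p => if !(pvValid p.2) then ones.map (fun j => p.1 - j) else []))

-- ''.join(sequence[i + j] for j in ones)
def pvWindowB (s : List Char) (i : Int) (ones : List Int) : List Char :=
  ones.filterMap (fun j => PySem.List.pyGet? s (i + j))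

def spaced_kmer_alt (sequence : String) (mask : String) : List String :=
  let s := sequence.toList
  let ones := pvOnesB mask.toList
  let bad := pvBadStarts s ones
  (PySem.List.pyRange 0 ((s.length : Int) - (mask.toList.length : Int) + 1) 1).filterMap
    (fun i =>
      if !(PySem.Set.contains bad i) then some (String.mk (pvWindowB s i ones)) else none)

-- ===== PRECONDITION & SPEC =====
def Spec_spaced_kmer (sequence : String) (mask : String) (out : List String) : Prop := out = spaced_kmer_alt sequence mask
instance (sequence : String) (mask : String) (out : List String) : Decidable (Spec_spaced_kmer sequence mask out) := by unfold Spec_spaced_kmer; infer_instance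

-- ===== CLAIM =====
def Claim_equal_spaced_kmer : Prop := ∀ (sequence : String) (mask : String), Dom_spaced_kmer sequence mask → Spec_spaced_kmer sequence mask (spaced_kmer sequence mask)

-- ===== LEMMAS AND PROOFS =====

-- members of ones are the '1'-offsets of the mask, hence within [0, len mask)
theorem pvOnes_mem (mask : List Char) (j : Int) (h : j ∈ pvOnesB mask) :
    0 ≤ j ∧ j < (mask.length : Int) := by
  unfold pvOnesB at h
  rw [List.mem_filterMap] at h
  obtain ⟨p, hp, hpj⟩ := h
  rw [PySem.List.mem_enumerate_iff] at hp
  obtain ⟨k, hk, rfl⟩ := hp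
  by_cases hm : ((0:Int) + (k:Int), mask[k]).2 = '1'
  · simp [hm] at hpj; omega
  · simp [hm] at hpj

-- B's window = A's kmer comprehension (filterMap composition).
theorem pvWindow_eq_build (s : List Char) (i : Int) (mask : List Char) :
    pvWindowB s i (pvOnesB mask) = pvBuildA s i (PySem.List.enumerate mask) := by
  unfold pvWindowB pvOnesB pvBuildA
  rw [List.filterMap_filterMap]
  apply List.filterMap_congr
  intro p _
  by_cases h : p.2 = '1' <;> simp [h]

-- A's early-break check = 'all valid' over the gathered characters, provided
-- every masked position of the window is in range.
theorem pvCheck_eq_all (s : List Char) (i : Int) (l : List (Int × Char))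
    (H : ∀ p ∈ l, p.2 = '1' → (PySem.List.pyGet? s (i + p.1)).isSome) :
    pvCheckA s i l = (pvBuildA s i l).all pvValid := by
  induction l with
  | nil => simp [pvCheckA, pvBuildA]
  | cons p rest ih =>
    obtain ⟨j, m⟩ := p
    have Hrest : ∀ q ∈ rest, q.2 = '1' → (PySem.List.pyGet? s (i + q.1)).isSome := by
      intro q hq; exact H q (List.mem_cons_of_mem _ hq)
    by_cases hm : m = '1'
    · have hsome := H (j, m) (List.mem_cons_self) hm
      obtain ⟨c, hc⟩ := Option.isSome_iff_exists.mp hsome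
      simp only [pvCheckA, pvBuildA, List.filterMap_cons, hm, hc]
      by_cases hv : (['A', 'T', 'C', 'G'].contains c.toUpper) = true
      · simp [ih Hrest, pvBuildA, pvValid]
      · simp at *
        simp [hv, pvValid]
    · simp [pvCheckA, pvBuildA, hm, ih Hrest]

-- comprehension '[f(i) for i in l if p(i)]' as filter-then-map
theorem pvFilterMap_ite {α β : Type} (l : List α) (p : α → Bool) (f : α → β) :
    l.filterMap (fun x => if p x then some (f x) else none) = (l.filter p).map f := by
  induction l with
  | nil => rfl
  | cons x xs ih =>
    by_cases h : p x = true <;> simp [h, ih]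

-- every masked position of an admitted window is in range
theorem pvInRange (s mask : List Char) (i : Int)
    (hi : i ∈ PySem.List.pyRange 0 ((s.length : Int) - (mask.length : Int) + 1) 1) :
    ∀ p ∈ PySem.List.enumerate mask, p.2 = '1' →
      (PySem.List.pyGet? s (i + p.1)).isSome := by
  rw [PySem.List.mem_pyRange_one] at hi
  intro p hp _
  rw [PySem.List.mem_enumerate_iff] at hp
  obtain ⟨k, hk, rfl⟩ := hp
  have h0 : (0:Int) ≤ i + (0 + (k:Int)) := by omega
  show (PySem.List.pyGet? s (i + (0 + (k:Int)))).isSome = true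
  rw [PySem.List.pyGet?_of_nonneg (xs := s) h0]
  simp
  omega

-- the sieve's verdict agrees with 'all gathered characters valid' on admitted windows
theorem pvAll_eq_notBad (s mask : List Char) (i : Int)
    (hi : i ∈ PySem.List.pyRange 0 ((s.length : Int) - (mask.length : Int) + 1) 1) :
    (pvWindowB s i (pvOnesB mask)).all pvValid
      = !(PySem.Set.contains (pvBadStarts s (pvOnesB mask)) i) := by
  rw [PySem.List.mem_pyRange_one] at hi
  rw [Bool.eq_iff_iff]
  unfold pvBadStarts pvWindowB
  simp only [List.all_eq_true, List.mem_filterMap, Bool.not_eq_true', PySem.Set.contains,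
    List.contains_eq_mem, decide_eq_false_iff_not, PySem.Set.mem_ofList, List.mem_flatMap]
  constructor
  · -- all valid → i not poisoned
    rintro Hall ⟨p, hp, hin⟩
    rw [PySem.List.mem_enumerate_iff] at hp
    obtain ⟨b, hb, rfl⟩ := hp
    cases hveq : pvValid (((0:Int) + (b:Int), s[b]).2)
    · rw [if_pos hveq] at hin
      obtain ⟨j, hj, hji⟩ := List.mem_map.mp hin
      have hval : pvValid s[b] = true := by
        apply Hall
        refine ⟨j, hj, ?_⟩
        have hij : i + j = (b : Int) := by omega
        rw [hij, PySem.List.pyGet?_of_nonneg (xs := s) (by omega)]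
        rw [Int.toNat_natCast, List.getElem?_eq_getElem hb]
      rw [hveq] at hval
      exact Bool.false_ne_true hval
    · rw [if_neg (by simp [hveq])] at hin
      exact (List.not_mem_nil) hin
  · -- i not poisoned → all valid
    intro Hnb c hc
    obtain ⟨j, hj, hget⟩ := hc
    have hjb := pvOnes_mem mask j hj
    have h0 : (0:Int) ≤ i + j := by omega
    rw [PySem.List.pyGet?_of_nonneg (xs := s) h0] at hget
    have hlt : (i + j).toNat < s.length := by
      by_contra hge
      rw [List.getElem?_eq_none (by omega)] at hget
      simp at hget
    have hcc : c = s[(i + j).toNat] := by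
      rw [List.getElem?_eq_getElem hlt] at hget
      exact (Option.some.inj hget).symm
    by_contra hv
    apply Hnb
    have hvf : pvValid ((((i + j).toNat : Nat) : Int), s[(i + j).toNat]).2 = false := by
      show pvValid s[(i + j).toNat] = false
      rw [← hcc]
      exact Bool.eq_false_iff.mpr hv
    refine ⟨((((i + j).toNat : Nat) : Int), s[(i + j).toNat]), ?_, ?_⟩
    · rw [PySem.List.mem_enumerate_iff]
      exact ⟨(i + j).toNat, hlt, by rw [Int.zero_add]⟩
    · rw [if_pos hvf]
      refine List.mem_map.mpr ⟨j, hj, ?_⟩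
      omega

theorem spaced_kmer_eq (sequence mask : String) :
    spaced_kmer sequence mask = spaced_kmer_alt sequence mask := by
  unfold spaced_kmer spaced_kmer_alt
  rw [PySem.List.foldl_append_if, pvFilterMap_ite]
  simp only [List.nil_append, pvWindow_eq_build]
  rw [List.filter_congr (fun i hi => ?_)]
  rw [pvCheck_eq_all sequence.toList i (PySem.List.enumerate mask.toList)
      (pvInRange sequence.toList mask.toList i hi),
    ← pvWindow_eq_build, pvAll_eq_notBad sequence.toList mask.toList i hi]

-- ===== VERDICT =====
theorem spaced_kmer_spec : Claim_equal_spaced_kmer := by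
  intro sequence mask _
  exact spaced_kmer_eq sequence mask
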